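-- pv_equiv track=rewrite | github.com/Qubits-01/CS-12-Lab-Exercises | Problem Set 2/CS12_PS02_Part2_No2_Viernes.py | solve
-- ===== SOURCE A (Python) =====
-- def solve(A, L, curr_sequence=''):
--     count_A, count_L = int(), int()
--     for char in curr_sequence:
--         if 'A' == char:
--             count_A += 1
--         else:
--             count_L += 1
--
--     if (count_A + (count_L // L)) == A:
--         return [curr_sequence]
--
--     return solve(A, L, curr_sequence+'A') + solve(A, L, curr_sequence+'L')
-- ===== SOURCE B (Python) =====
-- def solve(A, L, curr_sequence=''):
--     results = []
--     stack = [curr_sequence]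
--     while stack:
--         seq = stack.pop()
--         count_A = seq.count('A')
--         count_L = len(seq) - count_A
--         if count_A + count_L // L == A:
--             results.append(seq)
--         else:
--             stack.append(seq + 'L')
--             stack.append(seq + 'A')
--     return results
-- ===== Notes on version B (the rewrite author's own statement) =====
-- stated objective: alternative
-- what changed: The tree recursion is replaced by an iterative DFS over an explicit LIFO stack (push the 'L'-child first so the 'A'-child is processed first, preserving A's preorder leaf order), with the A/L counts recomputed via str.count instead of a character loop.
import Mathlib
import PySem

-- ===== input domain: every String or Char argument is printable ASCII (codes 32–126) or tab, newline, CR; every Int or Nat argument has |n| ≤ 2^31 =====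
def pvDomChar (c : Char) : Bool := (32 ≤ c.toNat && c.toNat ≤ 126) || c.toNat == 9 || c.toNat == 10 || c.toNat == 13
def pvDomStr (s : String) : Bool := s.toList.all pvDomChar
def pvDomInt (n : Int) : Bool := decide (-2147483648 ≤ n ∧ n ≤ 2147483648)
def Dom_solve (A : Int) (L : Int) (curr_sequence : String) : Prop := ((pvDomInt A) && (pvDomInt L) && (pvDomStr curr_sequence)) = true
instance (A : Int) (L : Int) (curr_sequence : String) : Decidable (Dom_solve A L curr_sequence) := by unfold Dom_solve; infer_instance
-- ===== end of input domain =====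

-- B rewrites A's tree recursion as an iterative DFS over an explicit LIFO stack (the 'L'-child is
-- pushed first so the 'A'-child is processed first, preserving A's preorder output order), and the
-- A/L counts are recomputed with str.count instead of a character loop.
-- Both ports carry a fuel guard that only makes the same computation total; under Pre_solve
-- (exactly the inputs on which the Python A returns instead of raising) the fuel is sufficient.

-- measure used only as a FUEL BOUND by both ports
def pvMeas (A : Int) (L : Int) (s : List Char) : Int :=
  L * (A + 1) - (L * (s.count 'A' : Int) + ((s.length : Int) - (s.count 'A' : Int)))

-- ===== PORT A =====
-- the for-loop of A: fold over the characters accumulating (count_A, count_L)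
def solveCounts (s : List Char) : Int × Int :=
  s.foldl (fun p c => if 'A' = c then (p.1 + 1, p.2) else (p.1, p.2 + 1)) (0, 0)

def solveAux (fuel : Nat) (A : Int) (L : Int) (s : List Char) : List String :=
  match fuel with
  | 0 => []   -- fuel guard only; never reached under Pre_solve
  | fuel + 1 =>
    let p := solveCounts s
    if p.1 + PySem.Int.floordiv p.2 L = A then [String.ofList s]
    else solveAux fuel A L (s ++ ['A']) ++ solveAux fuel A L (s ++ ['L'])

def solve (A : Int) (L : Int) (curr_sequence : String) : List String :=
  solveAux ((pvMeas A L curr_sequence.toList).toNat + 1) A L curr_sequence.toList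

-- ===== PORT B =====
-- the while-loop of B: stack with its top at the head; pop, test, append or push the two children
def altLoop (fuel : Nat) (A : Int) (L : Int) (stack : List (List Char)) (results : List String) : List String :=
  match fuel, stack with
  | _, [] => results
  | 0, _ => results   -- fuel guard only; never reached under Pre_solve
  | fuel + 1, seq :: rest =>
    let count_A : Int := (PySem.List.count seq 'A' : Int)
    let count_L : Int := (seq.length : Int) - count_A
    if count_A + PySem.Int.floordiv count_L L = A then
      altLoop fuel A L rest (results ++ [String.ofList seq])
    else
      altLoop fuel A L ((seq ++ ['A']) :: (seq ++ ['L']) :: rest) results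

def solve_alt (A : Int) (L : Int) (curr_sequence : String) : List String :=
  altLoop (3 ^ (pvMeas A L curr_sequence.toList).toNat) A L [curr_sequence.toList] []

-- ===== PRECONDITION & SPEC =====
-- value tested by the Python code, computed from the input alone
def pvVal (L : Int) (s : List Char) : Int :=
  (s.count 'A' : Int) + PySem.Int.floordiv ((s.length : Int) - (s.count 'A' : Int)) L

-- Pre_ is exactly where the Python A returns: L = 0 raises ZeroDivisionError; for L ≥ 1 the
-- recursion terminates iff the tested value is ≤ A; for L ≤ -1 it terminates iff it is already = A
-- (otherwise an all-'A' or all-'L' branch recurses forever: RecursionError).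
def Pre_solve (A : Int) (L : Int) (curr_sequence : String) : Prop :=
  (1 ≤ L ∧ pvVal L curr_sequence.toList ≤ A) ∨ (L ≤ -1 ∧ pvVal L curr_sequence.toList = A)
instance (A : Int) (L : Int) (curr_sequence : String) : Decidable (Pre_solve A L curr_sequence) := by
  unfold Pre_solve; infer_instance

def pvWitness_solve : Int × Int × String := (2, 2, "AL")

def Spec_solve (A : Int) (L : Int) (curr_sequence : String) (out : List String) : Prop := out = solve_alt A L curr_sequence
instance (A : Int) (L : Int) (curr_sequence : String) (out : List String) : Decidable (Spec_solve A L curr_sequence out) := by unfold Spec_solve; infer_instance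

-- ===== CLAIM (what is proved, stated in full; the proofs are below) =====
def Claim_equal_solve : Prop := ∀ (A : Int) (L : Int) (curr_sequence : String), Dom_solve A L curr_sequence → Pre_solve A L curr_sequence → Spec_solve A L curr_sequence (solve A L curr_sequence)

-- ===== LEMMAS AND PROOFS =====

theorem foldlCounts (s : List Char) : ∀ p : Int × Int,
    s.foldl (fun p c => if 'A' = c then (p.1 + 1, p.2) else (p.1, p.2 + 1)) p
      = (p.1 + (s.count 'A' : Int), p.2 + ((s.length : Int) - (s.count 'A' : Int))) := by
  induction s with
  | nil => intro p; simp
  | cons c t ih =>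
    intro p
    by_cases h : 'A' = c
    · subst h
      simp only [List.foldl_cons, ih, List.count_cons_self, List.length_cons, Prod.mk.injEq]
      constructor <;> push_cast <;> omega
    · simp only [List.foldl_cons, if_neg h, ih, List.length_cons,
        List.count_cons_of_ne (Ne.symm h), Prod.mk.injEq]
      constructor <;> push_cast <;> omega

theorem solveCounts_eq (s : List Char) :
    solveCounts s = ((s.count 'A' : Int), ((s.length : Int) - (s.count 'A' : Int))) := by
  unfold solveCounts
  rw [foldlCounts]
  simp

theorem meas_pos_arith (A L cA cL : Int) (hL : 1 ≤ L)
    (hv : cA + PySem.Int.floordiv cL L ≤ A) : 1 ≤ L * (A + 1) - (L * cA + cL) := by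
  rw [PySem.Int.floordiv_eq_ediv_of_pos (by omega)] at hv
  have hdm := Int.mul_ediv_add_emod cL L
  have hml := Int.emod_lt_of_pos cL (show 0 < L by omega)
  have hm0 := Int.emod_nonneg cL (show L ≠ 0 by omega)
  have hnn : 0 ≤ L * (A - (cA + cL / L)) := mul_nonneg (by omega) (by omega)
  nlinarith [hnn, hdm, hml, hm0]

theorem pvMeas_pos (A L : Int) (s : List Char) (hL : 1 ≤ L) (hv : pvVal L s ≤ A) :
    1 ≤ pvMeas A L s :=
  meas_pos_arith A L _ _ hL hv

theorem pvVal_appendA (L : Int) (s : List Char) :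
    pvVal L (s ++ ['A']) = pvVal L s + 1 := by
  unfold pvVal
  have h1 : ((s ++ ['A']).count 'A' : Int) = (s.count 'A' : Int) + 1 := by
    simp [List.count_append]
  have h2 : (((s ++ ['A']).length : Int)) = (s.length : Int) + 1 := by simp
  rw [h1, h2]
  have h3 : (s.length : Int) + 1 - ((s.count 'A' : Int) + 1)
      = (s.length : Int) - (s.count 'A' : Int) := by ring
  rw [h3]; ring

theorem pvVal_appendL (L : Int) (s : List Char) (hL : 1 ≤ L) :
    pvVal L (s ++ ['L']) ≤ pvVal L s + 1 := by
  unfold pvVal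
  have h1 : ((s ++ ['L']).count 'A' : Int) = (s.count 'A' : Int) := by
    simp [List.count_append]
  have h2 : (((s ++ ['L']).length : Int)) = (s.length : Int) + 1 := by simp
  rw [h1, h2]
  have h3 : (s.length : Int) + 1 - (s.count 'A' : Int)
      = ((s.length : Int) - (s.count 'A' : Int)) + 1 := by ring
  rw [h3]
  set cL : Int := (s.length : Int) - (s.count 'A' : Int)
  rw [PySem.Int.floordiv_eq_ediv_of_pos (by omega), PySem.Int.floordiv_eq_ediv_of_pos (by omega)]
  have hmono : (cL + 1) / L ≤ (cL + L) / L := Int.ediv_le_ediv (by omega) (by omega)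
  have hstep : (cL + L) / L = cL / L + 1 := by
    have := Int.add_mul_ediv_right cL 1 (show L ≠ 0 by omega)
    simpa using this
  omega

theorem pvMeas_appendA (A L : Int) (s : List Char) :
    pvMeas A L (s ++ ['A']) = pvMeas A L s - L := by
  unfold pvMeas
  have h1 : ((s ++ ['A']).count 'A' : Int) = (s.count 'A' : Int) + 1 := by
    simp [List.count_append]
  have h2 : (((s ++ ['A']).length : Int)) = (s.length : Int) + 1 := by simp
  rw [h1, h2]; ring

theorem pvMeas_appendL (A L : Int) (s : List Char) :
    pvMeas A L (s ++ ['L']) = pvMeas A L s - 1 := by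
  unfold pvMeas
  have h1 : ((s ++ ['L']).count 'A' : Int) = (s.count 'A' : Int) := by
    simp [List.count_append]
  have h2 : (((s ++ ['L']).length : Int)) = (s.length : Int) + 1 := by simp
  rw [h1, h2]; ring

-- one unfolding step of port A, with the counts replaced by their closed values
theorem solveAux_succ (n : Nat) (A L : Int) (s : List Char) :
    solveAux (n + 1) A L s =
      if pvVal L s = A then [String.ofList s]
      else solveAux n A L (s ++ ['A']) ++ solveAux n A L (s ++ ['L']) := by
  simp only [solveAux, solveCounts_eq]
  rfl

-- fuel independence for port A: any fuel ≥ the measure computes the canonical value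
theorem solveAux_fuel (A L : Int) (hL : 1 ≤ L) :
    ∀ n, ∀ s : List Char, pvVal L s ≤ A → (pvMeas A L s).toNat ≤ n →
      solveAux n A L s = solveAux ((pvMeas A L s).toNat) A L s := by
  intro n
  induction n using Nat.strong_induction_on with
  | _ n ih =>
    intro s hv hm
    have h1 : 1 ≤ (pvMeas A L s).toNat := by
      have := pvMeas_pos A L s hL hv; omega
    obtain ⟨t, ht⟩ : ∃ t, (pvMeas A L s).toNat = t + 1 := ⟨(pvMeas A L s).toNat - 1, by omega⟩
    obtain ⟨n', hn⟩ : ∃ n', n = n' + 1 := ⟨n - 1, by omega⟩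
    subst hn
    rw [ht, solveAux_succ, solveAux_succ]
    by_cases hc : pvVal L s = A
    · simp [hc]
    · simp only [hc, if_false]
      have hlt : pvVal L s < A := lt_of_le_of_ne hv hc
      have hvA : pvVal L (s ++ ['A']) ≤ A := by rw [pvVal_appendA]; omega
      have hvL : pvVal L (s ++ ['L']) ≤ A := by
        have := pvVal_appendL L s hL; omega
      have hmA : (pvMeas A L (s ++ ['A'])).toNat ≤ t := by
        rw [pvMeas_appendA]; omega
      have hmL : (pvMeas A L (s ++ ['L'])).toNat ≤ t := by
        rw [pvMeas_appendL]; omega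
      have htn : t ≤ n' := by omega
      rw [ih n' (by omega) _ hvA (le_trans hmA htn),
          ih n' (by omega) _ hvL (le_trans hmL htn),
          ih t (by omega) _ hvA hmA,
          ih t (by omega) _ hvL hmL]

-- one unfolding step of port B on a nonempty stack
theorem altLoop_succ (f : Nat) (A L : Int) (seq : List Char) (rest : List (List Char))
    (res : List String) :
    altLoop (f + 1) A L (seq :: rest) res =
      if pvVal L seq = A then altLoop f A L rest (res ++ [String.ofList seq])
      else altLoop f A L ((seq ++ ['A']) :: (seq ++ ['L']) :: rest) res := by
  simp only [altLoop, PySem.List.count_eq]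
  rfl

theorem altLoop_nil (f : Nat) (A L : Int) (res : List String) :
    altLoop f A L [] res = res := by
  cases f <;> rfl

-- the stack loop of port B consumes the stack tree by tree, in preorder
theorem altLoop_eq (A L : Int) (hL : 1 ≤ L) :
    ∀ fuel : Nat, ∀ stack : List (List Char), ∀ res : List String,
      (∀ s ∈ stack, pvVal L s ≤ A) →
      (stack.map (fun s => 3 ^ (pvMeas A L s).toNat)).sum ≤ fuel →
      altLoop fuel A L stack res =
        res ++ (stack.map (fun s => solveAux ((pvMeas A L s).toNat) A L s)).flatten := by
  intro fuel
  induction fuel using Nat.strong_induction_on with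
  | _ fuel ih =>
    intro stack res hinv hsum
    match stack with
    | [] => simp [altLoop_nil]
    | s :: rest =>
      have hv := hinv s (by simp)
      have h1 : 1 ≤ (pvMeas A L s).toNat := by
        have := pvMeas_pos A L s hL hv; omega
      obtain ⟨t, ht⟩ : ∃ t, (pvMeas A L s).toNat = t + 1 := ⟨(pvMeas A L s).toNat - 1, by omega⟩
      simp only [List.map_cons, List.sum_cons] at hsum
      have hpow : 1 ≤ 3 ^ (pvMeas A L s).toNat := Nat.one_le_pow _ _ (by norm_num)
      obtain ⟨f, hf⟩ : ∃ f, fuel = f + 1 := ⟨fuel - 1, by omega⟩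
      subst hf
      rw [altLoop_succ]
      by_cases hc : pvVal L s = A
      · rw [if_pos hc]
        rw [ih f (by omega) rest (res ++ [String.ofList s])
            (fun x hx => hinv x (by simp [hx])) (by omega)]
        simp only [List.map_cons, List.flatten_cons]
        rw [ht, solveAux_succ, if_pos hc]
        simp
      · rw [if_neg hc]
        have hlt : pvVal L s < A := lt_of_le_of_ne hv hc
        have hvA : pvVal L (s ++ ['A']) ≤ A := by rw [pvVal_appendA]; omega
        have hvL : pvVal L (s ++ ['L']) ≤ A := by
          have := pvVal_appendL L s hL; omega
        have hmA : (pvMeas A L (s ++ ['A'])).toNat ≤ t := by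
          rw [pvMeas_appendA]; omega
        have hmL : (pvMeas A L (s ++ ['L'])).toNat ≤ t := by
          rw [pvMeas_appendL]; omega
        have hpA : 3 ^ (pvMeas A L (s ++ ['A'])).toNat ≤ 3 ^ t :=
          Nat.pow_le_pow_right (by norm_num) hmA
        have hpL : 3 ^ (pvMeas A L (s ++ ['L'])).toNat ≤ 3 ^ t :=
          Nat.pow_le_pow_right (by norm_num) hmL
        have h3t : 3 ^ (pvMeas A L s).toNat = 3 * 3 ^ t := by rw [ht, pow_succ]; ring
        have hpt : 1 ≤ 3 ^ t := Nat.one_le_pow _ _ (by norm_num)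
        rw [ih f (by omega) ((s ++ ['A']) :: (s ++ ['L']) :: rest) res
            (by
              intro x hx
              simp only [List.mem_cons] at hx
              rcases hx with h | h | h
              · exact h ▸ hvA
              · exact h ▸ hvL
              · exact hinv x (by simp [h]))
            (by simp only [List.map_cons, List.sum_cons]; omega)]
        simp only [List.map_cons, List.flatten_cons]
        rw [ht, solveAux_succ, if_neg hc]
        rw [solveAux_fuel A L hL t _ hvA hmA, solveAux_fuel A L hL t _ hvL hmL]
        simp

-- ===== VERDICT (by name: the statement is the Claim_ definition above) =====
theorem solve_spec : Claim_equal_solve := by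
  intro A L curr _ hpre
  unfold Spec_solve solve solve_alt
  rcases hpre with ⟨hL, hv⟩ | ⟨hL, hv⟩
  · rw [altLoop_eq A L hL _ [curr.toList] [] (by simpa using hv) (by simp)]
    rw [solveAux_fuel A L hL _ _ hv (by omega)]
    simp
  · obtain ⟨f, hf⟩ : ∃ f, 3 ^ (pvMeas A L curr.toList).toNat = f + 1 :=
      ⟨3 ^ (pvMeas A L curr.toList).toNat - 1, by
        have : 1 ≤ 3 ^ (pvMeas A L curr.toList).toNat := Nat.one_le_pow _ _ (by norm_num)
        omega⟩
    rw [hf, solveAux_succ, altLoop_succ, if_pos hv, if_pos hv, altLoop_nil]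
    simp
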